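-- pv_equiv track=rewrite | github.com/TheBrainSprinters/GAMEDAY | rnd/scorebyrank.py | ranked_scores_by_rank_linear
-- ===== SOURCE A (Python) =====
-- def ranked_scores_by_rank_linear(min_score: int, max_score: int, num_scores: int) -> list[int]:
--     """Returns the list of scores for each player would receive, from rank
--     1 to num_scores. Rank 1 player will receive max_score, rank n_scores player
--     will receive min_score, in between ranks the score will be linearly
--     interpolated.
--
--     Args:
--         min_score (int): Minimum score, the score that will be given to the
--         player with rank num_scores.
--         max_score (int): Maximum score, the score that will be given to the
--         player with rank 1.
--         num_scores (int): Number of players.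
--
--     Returns:
--         list[int]: The list of scores for each player would receive, from
--         rank 1 to num_scores. The first player will receive max_score, the
--         last player will receive min_score.
--     """
--     gap = (max_score - min_score) // (num_scores - 1)
--     remainder = (max_score - min_score) % (num_scores - 1)
--     scores = [(min_score + (i * gap)) for i in range (num_scores)]
--     for i in range (remainder):
--         scores[num_scores - 1 - i] += remainder - i
--     scores.reverse()
--     return scores
-- ===== SOURCE B (Python) =====
-- def ranked_scores_by_rank_linear(min_score: int, max_score: int, num_scores: int) -> list[int]:
--     gap, remainder = divmod(max_score - min_score, num_scores - 1)
--     return [max_score - k * (gap + 1) if k < remainder else max_score - k * gap - remainder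
--             for k in range(num_scores)]
-- ===== Notes on version B (the rewrite author's own statement) =====
-- stated objective: simpler
-- what changed: Instead of building an ascending list, patching its top 'remainder' entries in a second loop and reversing, B emits each rank's score directly in one descending pass via a per-index closed-form formula.
import Mathlib
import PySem

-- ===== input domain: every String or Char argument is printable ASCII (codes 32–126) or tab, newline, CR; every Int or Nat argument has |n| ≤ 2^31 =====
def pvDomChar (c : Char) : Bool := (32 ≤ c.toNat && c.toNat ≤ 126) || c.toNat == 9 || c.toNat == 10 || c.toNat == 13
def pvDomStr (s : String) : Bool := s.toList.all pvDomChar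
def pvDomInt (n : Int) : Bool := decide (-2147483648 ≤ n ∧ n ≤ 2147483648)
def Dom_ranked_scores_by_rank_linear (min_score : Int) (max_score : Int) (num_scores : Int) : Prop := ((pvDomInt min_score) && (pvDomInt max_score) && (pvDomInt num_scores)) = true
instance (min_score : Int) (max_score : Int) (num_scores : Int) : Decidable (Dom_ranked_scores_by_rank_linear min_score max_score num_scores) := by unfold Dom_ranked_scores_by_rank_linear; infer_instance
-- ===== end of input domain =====

-- B replaces A's ascending build + tail-patch loop + reverse with one descending pass
-- emitting each rank's score by a closed-form per-index formula (objective: simpler).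

-- ===== PORT A =====
def ranked_scores_by_rank_linear (min_score : Int) (max_score : Int) (num_scores : Int) : List Int :=
  let gap := PySem.Int.floordiv (max_score - min_score) (num_scores - 1)
  let remainder := PySem.Int.mod (max_score - min_score) (num_scores - 1)
  let scores := (PySem.List.pyRange 0 num_scores 1).map (fun i => min_score + i * gap)
  let scores := (PySem.List.pyRange 0 remainder 1).foldl
    (fun s i => PySem.List.pySetD s (num_scores - 1 - i)
      (PySem.List.pyGetD s (num_scores - 1 - i) 0 + (remainder - i))) scores
  scores.reverse

-- ===== PORT B =====
def ranked_scores_by_rank_linear_alt (min_score : Int) (max_score : Int) (num_scores : Int) : List Int :=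
  let gap := PySem.Int.floordiv (max_score - min_score) (num_scores - 1)
  let remainder := PySem.Int.mod (max_score - min_score) (num_scores - 1)
  (PySem.List.pyRange 0 num_scores 1).map (fun k =>
    if k < remainder then max_score - k * (gap + 1) else max_score - k * gap - remainder)

-- ===== PRECONDITION & SPEC =====
-- Pre_ excludes exactly num_scores = 1, where A raises ZeroDivisionError (and B does too).
def Pre_ranked_scores_by_rank_linear (min_score : Int) (max_score : Int) (num_scores : Int) : Prop :=
  num_scores ≠ 1
instance (min_score : Int) (max_score : Int) (num_scores : Int) : Decidable (Pre_ranked_scores_by_rank_linear min_score max_score num_scores) := by unfold Pre_ranked_scores_by_rank_linear; infer_instance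

def pvWitness_ranked_scores_by_rank_linear : Int × Int × Int := (1, 10, 5)

def Spec_ranked_scores_by_rank_linear (min_score : Int) (max_score : Int) (num_scores : Int) (out : List Int) : Prop := out = ranked_scores_by_rank_linear_alt min_score max_score num_scores
instance (min_score : Int) (max_score : Int) (num_scores : Int) (out : List Int) : Decidable (Spec_ranked_scores_by_rank_linear min_score max_score num_scores out) := by unfold Spec_ranked_scores_by_rank_linear; infer_instance

-- ===== CLAIM (what is proved, stated in full; the proofs are below) =====
def Claim_equal_ranked_scores_by_rank_linear : Prop := ∀ (min_score : Int) (max_score : Int) (num_scores : Int), Dom_ranked_scores_by_rank_linear min_score max_score num_scores → Pre_ranked_scores_by_rank_linear min_score max_score num_scores → Spec_ranked_scores_by_rank_linear min_score max_score num_scores (ranked_scores_by_rank_linear min_score max_score num_scores)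

-- ===== LEMMAS AND PROOFS =====

-- the patch fold preserves length
theorem pv_length_fold (n rem : Int) :
    ∀ (l : List Int) (s : List Int),
      (l.foldl (fun s i => PySem.List.pySetD s (n - 1 - i)
        (PySem.List.pyGetD s (n - 1 - i) 0 + (rem - i))) s).length = s.length := by
  intro l
  induction l with
  | nil => intro s; rfl
  | cons x xs ih =>
      intro s
      simp only [List.foldl_cons, ih, PySem.List.length_pySetD]

-- effect of the patch fold on each entry
theorem pv_patch_getD (n rem : Int) (hrem : rem ≤ n - 1) :
    ∀ (fuel : Nat) (a : Int), (rem - a).toNat = fuel → 0 ≤ a →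
      ∀ (s : List Int), s.length = n.toNat → ∀ (j : Nat), (j : Int) < n →
      PySem.List.pyGetD ((PySem.List.pyRange a rem 1).foldl
        (fun s i => PySem.List.pySetD s (n - 1 - i)
          (PySem.List.pyGetD s (n - 1 - i) 0 + (rem - i))) s) (j : Int) 0
      = PySem.List.pyGetD s (j : Int) 0 +
        (if a ≤ n - 1 - (j : Int) ∧ n - 1 - (j : Int) < rem then rem - (n - 1 - (j : Int)) else 0) := by
  intro fuel
  induction fuel with
  | zero =>
      intro a hfuel ha s hs j hj
      rw [PySem.List.pyRange_one_eq_nil (by omega)]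
      rw [if_neg (by omega)]
      simp
  | succ f ih =>
      intro a hfuel ha s hs j hj
      have ha' : a < rem := by omega
      rw [PySem.List.pyRange_one_cons ha']
      simp only [List.foldl_cons]
      set v : Int := PySem.List.pyGetD s (n - 1 - a) 0 + (rem - a) with hv
      have hidx : n - 1 - a = ((n - 1 - a).toNat : Int) := by omega
      have hlen' : (PySem.List.pySetD s (n - 1 - a) v).length = n.toNat :=
        by rw [PySem.List.length_pySetD, hs]
      rw [ih (a + 1) (by omega) (by omega) _ hlen' j hj]
      have hin : (n - 1 - a).toNat < s.length := by omega
      rw [hidx, PySem.List.pyGetD_pySetD_natCast s _ j v 0 hin]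
      by_cases hcase : j = (n - 1 - a).toNat
      · rw [if_pos hcase]
        have hj' : (j : Int) = n - 1 - a := by omega
        rw [hv, hj']
        rw [if_neg (by omega), if_pos (by omega)]
        ring
      · rw [if_neg hcase]
        have hne : (j : Int) ≠ n - 1 - a := by omega
        by_cases hc2 : a + 1 ≤ n - 1 - (j : Int) ∧ n - 1 - (j : Int) < rem
        · rw [if_pos hc2, if_pos (by omega)]
        · rw [if_neg hc2, if_neg (by omega)]

-- ===== VERDICT (by name: the statement is the Claim_ definition above) =====
theorem ranked_scores_by_rank_linear_spec : Claim_equal_ranked_scores_by_rank_linear := by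
  intro mn mx n _ hpre
  unfold Spec_ranked_scores_by_rank_linear
  unfold ranked_scores_by_rank_linear ranked_scores_by_rank_linear_alt
  simp only []
  set gap := PySem.Int.floordiv (mx - mn) (n - 1) with hgap
  set rem := PySem.Int.mod (mx - mn) (n - 1) with hrm
  by_cases hn : n ≤ 0
  · -- both sides are the empty list
    have hrem0 : rem ≤ 0 := (PySem.Int.mod_neg_bounds (mx - mn) (b := n - 1) (by omega)).2
    rw [PySem.List.pyRange_one_eq_nil hn, PySem.List.pyRange_one_eq_nil hrem0]
    simp
  · have hn2 : 2 ≤ n := by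
      have := hpre; unfold Pre_ranked_scores_by_rank_linear at this; omega
    have hpos : (0:Int) < n - 1 := by omega
    have hrem0 : 0 ≤ rem := PySem.Int.mod_nonneg (mx - mn) hpos
    have hremlt : rem < n - 1 := PySem.Int.mod_lt (mx - mn) hpos
    have hd : gap * (n - 1) + rem = mx - mn := PySem.Int.floordiv_mul_add_mod (mx - mn) (n - 1)
    set init : List Int := (PySem.List.pyRange 0 n 1).map (fun i => mn + i * gap) with hinit
    have hinitlen : init.length = n.toNat := by
      rw [hinit, List.length_map, PySem.List.length_pyRange_one]; omega
    set final : List Int := (PySem.List.pyRange 0 rem 1).foldl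
      (fun s i => PySem.List.pySetD s (n - 1 - i)
        (PySem.List.pyGetD s (n - 1 - i) 0 + (rem - i))) init with hfinal
    have hfinallen : final.length = n.toNat := by
      rw [hfinal, pv_length_fold, hinitlen]
    apply List.ext_getElem
    · simp [hfinallen, PySem.List.length_pyRange_one]
    · intro k hk1 hk2
      have hkN : k < n.toNat := by
        simpa [hfinallen] using hk1
      -- right side: the closed-form value at index k
      rw [List.getElem_map, PySem.List.getElem_pyRange_one]
      -- left side: reverse then the fold characterisation
      rw [List.getElem_reverse]
      set j : Nat := final.length - 1 - k with hj
      have hjN : j < n.toNat := by omega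
      have hjval : (j : Int) = n - 1 - (k : Int) := by
        have : (j : Nat) = n.toNat - 1 - k := by omega
        omega
      have hjn : (j : Int) < n := by omega
      have hget : final[j] = PySem.List.pyGetD final (j : Int) 0 := by
        rw [PySem.List.pyGetD_eq_getElem final 0 (by omega) (by omega)]
        simp
      rw [hget, hfinal,
        pv_patch_getD n rem (by omega) (rem - 0).toNat 0 rfl (by omega) init hinitlen j hjn]
      have hInitAt : PySem.List.pyGetD init (j : Int) 0 = mn + (j : Int) * gap := by
        have hcast : n = ((n.toNat : Nat) : Int) := by omega
        rw [hinit, hcast, PySem.List.pyGetD_map_pyRange _ _ _ _ hjN]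
      rw [hInitAt]
      by_cases hkr : (0 : Int) + (k : Int) < rem
      · rw [if_pos (by omega), if_pos hkr, hjval]
        linear_combination hd
      · rw [if_neg (by omega), if_neg hkr, hjval]
        linear_combination hd
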